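-- pv_equiv track=rewrite | github.com/vinod-hn/Cyberbullying_detection1 | Cyberbullying-detection/06_api/routes/conversation_predict.py | detect_escalation
-- ===== SOURCE A (Python) =====
-- from typing import List
--
-- def detect_escalation(results: List[dict]) -> bool:
--     """
--     Detect if there's an escalation pattern in the conversation.
--     Escalation = increasing severity or confidence over consecutive messages.
--     """
--     if len(results) < 3:
--         return False
--
--     # Check for pattern of increasing cyberbullying indicators
--     bullying_streak = 0
--     max_streak = 0
--
--     for r in results:
--         if r["is_cyberbullying"]:
--             bullying_streak += 1
--             max_streak = max(max_streak, bullying_streak)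
--         else:
--             bullying_streak = 0
--
--     # Escalation if 3+ consecutive bullying messages or increasing confidence
--     return max_streak >= 3
-- ===== SOURCE B (Python) =====
-- from typing import List
--
-- def detect_escalation(results: List[dict]) -> bool:
--     if len(results) < 3:
--         return False
--     flags = [r["is_cyberbullying"] for r in results]
--     return any(a and b and c for a, b, c in zip(flags, flags[1:], flags[2:]))
-- ===== Notes on version B (the rewrite author's own statement) =====
-- stated objective: idiomatic
-- what changed: Replaces the running streak counter with max tracking by a sliding-window test over zipped triples of consecutive flags: escalation iff some window of 3 consecutive messages is all bullying.
import Mathlib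
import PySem

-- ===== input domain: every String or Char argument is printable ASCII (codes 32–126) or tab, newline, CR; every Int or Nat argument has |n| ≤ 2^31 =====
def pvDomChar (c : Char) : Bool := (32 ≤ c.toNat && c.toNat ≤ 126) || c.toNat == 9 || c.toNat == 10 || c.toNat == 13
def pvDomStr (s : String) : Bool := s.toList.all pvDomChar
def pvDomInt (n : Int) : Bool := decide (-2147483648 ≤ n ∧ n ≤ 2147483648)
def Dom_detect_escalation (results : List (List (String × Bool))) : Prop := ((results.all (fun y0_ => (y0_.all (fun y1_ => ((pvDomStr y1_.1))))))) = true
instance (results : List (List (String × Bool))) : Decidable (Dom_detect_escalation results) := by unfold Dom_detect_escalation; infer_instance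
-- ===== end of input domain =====

-- B replaces A's running streak counter by a sliding-window any() over zipped triples of
-- consecutive flags (idiomatic, same O(n) cost); equivalence of the return value is proved.

-- ===== PORT A =====
-- r["is_cyberbullying"]: under Pre_ the key is present, so getD is exact there.
def detect_escalation (results : List (List (String × Bool))) : Bool :=
  if results.length < 3 then false
  else
    let st := results.foldl
      (fun (s : Int × Int) r =>
        if (PySem.Dict.mk r).getD "is_cyberbullying" false then
          (s.1 + 1, max s.2 (s.1 + 1))
        else (0, s.2))
      (0, 0)
    decide (st.2 ≥ 3)

-- ===== PORT B =====
def detect_escalation_alt (results : List (List (String × Bool))) : Bool :=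
  if results.length < 3 then false
  else
    let flags := results.map (fun r => (PySem.Dict.mk r).getD "is_cyberbullying" false)
    (flags.zip ((flags.drop 1).zip (flags.drop 2))).any (fun t => t.1 && t.2.1 && t.2.2)

-- ===== PRECONDITION & SPEC =====
-- Pre_ excludes exactly the inputs where Python A raises KeyError: length ≥ 3 with some
-- message dict lacking the "is_cyberbullying" key (for length < 3, A returns False without lookup).
def Pre_detect_escalation (results : List (List (String × Bool))) : Prop :=
  results.length < 3 ∨ ∀ r ∈ results, ((PySem.Dict.mk r).get? "is_cyberbullying").isSome = true
instance (results : List (List (String × Bool))) : Decidable (Pre_detect_escalation results) := by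
  unfold Pre_detect_escalation; infer_instance
def pvWitness_detect_escalation : (List (List (String × Bool))) :=
  [[("is_cyberbullying", true)], [("is_cyberbullying", false)], [("is_cyberbullying", true)]]

def Spec_detect_escalation (results : List (List (String × Bool))) (out : Bool) : Prop := out = detect_escalation_alt results
instance (results : List (List (String × Bool))) (out : Bool) : Decidable (Spec_detect_escalation results out) := by unfold Spec_detect_escalation; infer_instance

-- ===== CLAIM (what is proved, stated in full; the proofs are below) =====
def Claim_equal_detect_escalation : Prop := ∀ (results : List (List (String × Bool))), Dom_detect_escalation results → Pre_detect_escalation results → Spec_detect_escalation results (detect_escalation results)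

-- ===== LEMMAS AND PROOFS =====

-- pre1 bs: bs starts with one true; pre2 bs: bs starts with two trues.
def pre1 : List Bool → Bool
  | [] => false
  | x :: _ => x

def pre2 : List Bool → Bool
  | [] => false
  | x :: rest => x && pre1 rest

-- anyTriple bs: some three consecutive elements of bs are all true.
def anyTriple : List Bool → Bool
  | [] => false
  | x :: rest => (x && pre2 rest) || anyTriple rest

def streakStep (s : Int × Int) (b : Bool) : Int × Int :=
  if b then (s.1 + 1, max s.2 (s.1 + 1)) else (0, s.2)

theorem pre1_cons (x : Bool) (r : List Bool) : pre1 (x :: r) = x := rfl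
theorem pre2_cons (x : Bool) (r : List Bool) : pre2 (x :: r) = (x && pre1 r) := rfl
theorem pre1_of_pre2 (r : List Bool) (h : pre2 r = true) : pre1 r = true := by
  cases r with
  | nil => simp [pre2] at h
  | cons x t =>
    rw [pre2_cons, Bool.and_eq_true] at h
    rw [pre1_cons]; exact h.1

theorem anyTriple_cons (x : Bool) (r : List Bool) :
    anyTriple (x :: r) = ((x && pre2 r) || anyTriple r) := rfl

-- A's fold's max-streak reaches 3 iff some triple of consecutive trues exists,
-- generalized over the incoming accumulator (s = current streak ≥ 0, m = max so far).
theorem foldl_streak_iff (bs : List Bool) : ∀ (s m : Int), 0 ≤ s →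
    ((bs.foldl streakStep (s, m)).2 ≥ 3 ↔
      m ≥ 3 ∨ (s ≥ 2 ∧ pre1 bs = true) ∨ (s ≥ 1 ∧ pre2 bs = true) ∨ anyTriple bs = true) := by
  induction bs with
  | nil => intro s m _; simp [pre1, pre2, anyTriple]
  | cons b rest ih =>
    intro s m hs
    cases b with
    | true =>
      simp only [List.foldl_cons, streakStep]
      rw [if_pos trivial, ih (s + 1) (max m (s + 1)) (by omega)]
      simp only [pre1_cons, pre2_cons, anyTriple_cons, Bool.true_and, ge_iff_le, le_max_iff]
      cases h2 : pre2 rest with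
      | true =>
        have h1 : pre1 rest = true := pre1_of_pre2 rest h2
        cases h3 : anyTriple rest <;>
          simp only [h1, h2, h3, Bool.or_false, Bool.or_true, Bool.false_eq_true, and_false,
            and_true, or_false, or_true, false_or, iff_iff_implies_and_implies] <;>
          constructor <;> intro hx <;> first | trivial | omega
      | false =>
        cases h1 : pre1 rest <;> cases h3 : anyTriple rest <;>
          simp only [h1, h2, h3, Bool.or_false, Bool.or_true, Bool.false_eq_true, and_false,
            and_true, or_false, or_true, false_or, iff_iff_implies_and_implies] <;>
          constructor <;> intro hx <;> first | trivial | omega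
    | false =>
      simp only [List.foldl_cons, streakStep]
      rw [if_neg (by simp), ih 0 m (by omega)]
      simp [pre1_cons, pre2_cons, anyTriple_cons]

-- B's zipped-triple any equals anyTriple.
theorem zipAny_eq (bs : List Bool) :
    ((bs.zip ((bs.drop 1).zip (bs.drop 2))).any (fun t => t.1 && t.2.1 && t.2.2)) = anyTriple bs := by
  match bs with
  | [] => rfl
  | [a] => simp [anyTriple, pre2]
  | [a, b] => simp [anyTriple, pre2, pre1]
  | a :: b :: c :: r =>
    have ih := zipAny_eq (b :: c :: r)
    simp only [List.drop, List.zip_cons_cons, List.any_cons] at ih ⊢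
    rw [ih]
    simp [anyTriple, pre2, pre1, Bool.and_assoc]
termination_by bs.length

-- ===== VERDICT (by name: the statement is the Claim_ definition above) =====
theorem detect_escalation_spec : Claim_equal_detect_escalation := by
  intro results _ _
  unfold Spec_detect_escalation detect_escalation detect_escalation_alt
  by_cases h : results.length < 3
  · simp [h]
  · simp only [h, if_false]
    rw [zipAny_eq]
    have hfold :
        results.foldl
          (fun (s : Int × Int) r =>
            if (PySem.Dict.mk r).getD "is_cyberbullying" false then
              (s.1 + 1, max s.2 (s.1 + 1))
            else (0, s.2)) (0, 0)
        = (results.map (fun r => (PySem.Dict.mk r).getD "is_cyberbullying" false)).foldl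
            streakStep (0, 0) := by
      rw [List.foldl_map]; rfl
    rw [hfold]
    have h3 := foldl_streak_iff
      (results.map (fun r => (PySem.Dict.mk r).getD "is_cyberbullying" false)) 0 0 (by omega)
    cases hA : anyTriple (results.map (fun r => (PySem.Dict.mk r).getD "is_cyberbullying" false)) with
    | true => simp [hA] at h3; simp [h3]
    | false =>
      simp [hA] at h3
      simp only [decide_eq_false_iff_not]
      omega
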